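-- pv_equiv track=rewrite | github.com/ssandree/vlm-experiment | data/video_sampling/sampling1_perseg.py | _fill_to_num_frames
-- ===== SOURCE A (Python) =====
-- from typing import List, Tuple
--
-- def _fill_to_num_frames(
--     frame_indices: List[int], max_fi: int, num_frames: int
-- ) -> List[int]:
--     out = list(frame_indices)
--     existing = set(out)
--     need = num_frames - len(out)
--     if need <= 0 or max_fi < 0:
--         return out[:num_frames]
--     candidates = [i for i in range(0, max_fi + 1) if i not in existing]
--     if len(candidates) < need:
--         step = 1
--     else:
--         step = max(1, len(candidates) // (need + 1))
--     added = 0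
--     for i in range(0, len(candidates), step):
--         if added >= need:
--             break
--         fi = candidates[i]
--         if fi not in existing:
--             existing.add(fi)
--             out.append(fi)
--             added += 1
--     out.sort()
--     return out[:num_frames]
-- ===== SOURCE B (Python) =====
-- from typing import List, Tuple
--
-- def _fill_to_num_frames(
--     frame_indices: List[int], max_fi: int, num_frames: int
-- ) -> List[int]:
--     out = list(frame_indices)
--     need = num_frames - len(out)
--     if need <= 0 or max_fi < 0:
--         return out[:num_frames]
--     # walk the gaps of the sorted distinct in-range existing indices
--     ex = sorted({x for x in out if 0 <= x <= max_fi})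
--     cands = []
--     prev = -1
--     for e in ex + [max_fi + 1]:
--         cands.extend(range(prev + 1, e))
--         prev = e
--     step = 1 if len(cands) < need else max(1, len(cands) // (need + 1))
--     picks = cands[::step][:need]
--     return sorted(out + picks)[:num_frames]
-- ===== Notes on version B (the rewrite author's own statement) =====
-- stated objective: alternative
-- what changed: B builds the candidate (missing-index) list by walking the gaps between the sorted distinct in-range existing indices instead of A's per-index set-membership scan over all of [0, max_fi], and replaces A's stateful picking loop (existing-set re-check + added counter) with a stride slice cands[::step][:need].
import Mathlib
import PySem

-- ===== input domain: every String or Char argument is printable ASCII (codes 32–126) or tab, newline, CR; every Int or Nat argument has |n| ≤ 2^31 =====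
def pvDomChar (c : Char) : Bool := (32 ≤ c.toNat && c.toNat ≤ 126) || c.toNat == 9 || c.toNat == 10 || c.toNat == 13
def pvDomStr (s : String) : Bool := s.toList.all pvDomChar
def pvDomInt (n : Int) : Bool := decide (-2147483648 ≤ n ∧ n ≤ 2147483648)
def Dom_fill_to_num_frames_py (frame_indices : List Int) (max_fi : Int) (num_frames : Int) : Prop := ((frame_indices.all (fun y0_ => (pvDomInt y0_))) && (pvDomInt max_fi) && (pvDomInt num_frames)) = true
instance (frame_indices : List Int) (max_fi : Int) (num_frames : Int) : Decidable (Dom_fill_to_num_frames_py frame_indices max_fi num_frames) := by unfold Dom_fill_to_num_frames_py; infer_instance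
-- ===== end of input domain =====

-- ===== PORT A =====
-- B builds the candidate list by walking the gaps of the sorted distinct in-range existing
-- indices and selects with a stride slice, instead of A's scan of every index in [0, max_fi]
-- with a per-index set-membership test and a stateful picking loop (objective: alternative).
def fill_to_num_frames_py (frame_indices : List Int) (max_fi : Int) (num_frames : Int) : List Int :=
  let out := frame_indices
  let existing : PySem.Set Int := PySem.Set.ofList out
  let need : Int := num_frames - (out.length : Int)
  if need ≤ 0 ∨ max_fi < 0 then
    PySem.List.slice out none (some num_frames)
  else
    let candidates : List Int :=
      (PySem.List.pyRange 0 (max_fi + 1) 1).filter (fun i => !(PySem.Set.contains existing i))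
    let step : Int :=
      if (candidates.length : Int) < need then 1
      else max 1 (PySem.Int.floordiv (candidates.length : Int) (need + 1))
    let fin :=
      (PySem.List.pyRange 0 (candidates.length : Int) step).foldl
        (fun (s : PySem.Set Int × List Int × Int) i =>
          if need ≤ s.2.2 then s        -- if added >= need: break (loop body is all that follows)
          else
            let fi := PySem.List.pyGetD candidates i 0
            if !(PySem.Set.contains s.1 fi) then
              (PySem.Set.add s.1 fi, s.2.1 ++ [fi], s.2.2 + 1)
            else s)
        (existing, out, 0)
    PySem.List.slice (PySem.List.sorted fin.2.1 (fun x => x) false) none (some num_frames)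

-- ===== PORT B =====
def fill_to_num_frames_py_alt (frame_indices : List Int) (max_fi : Int) (num_frames : Int) : List Int :=
  let out := frame_indices
  let need : Int := num_frames - (out.length : Int)
  if need ≤ 0 ∨ max_fi < 0 then
    PySem.List.slice out none (some num_frames)
  else
    let ex : List Int :=
      PySem.List.sorted
        (PySem.Set.ofList (out.filter (fun x => decide (0 ≤ x) && decide (x ≤ max_fi))))
        (fun x => x) false
    let cands : List Int :=
      ((ex ++ [max_fi + 1]).foldl
        (fun (s : List Int × Int) e => (s.1 ++ PySem.List.pyRange (s.2 + 1) e 1, e))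
        ([], -1)).1
    let step : Int :=
      if (cands.length : Int) < need then 1
      else max 1 (PySem.Int.floordiv (cands.length : Int) (need + 1))
    let picks : List Int :=
      PySem.List.slice ((PySem.List.slice? cands none none step).getD []) none (some need)
    PySem.List.slice (PySem.List.sorted (out ++ picks) (fun x => x) false) none (some num_frames)

-- ===== PRECONDITION & SPEC =====
def Spec_fill_to_num_frames_py (frame_indices : List Int) (max_fi : Int) (num_frames : Int) (out : List Int) : Prop := out = fill_to_num_frames_py_alt frame_indices max_fi num_frames
instance (frame_indices : List Int) (max_fi : Int) (num_frames : Int) (out : List Int) : Decidable (Spec_fill_to_num_frames_py frame_indices max_fi num_frames out) := by unfold Spec_fill_to_num_frames_py; infer_instance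

-- ===== CLAIM (what is proved, stated in full; the proofs are below) =====
def Claim_equal_fill_to_num_frames_py : Prop := ∀ (frame_indices : List Int) (max_fi : Int) (num_frames : Int), Dom_fill_to_num_frames_py frame_indices max_fi num_frames → Spec_fill_to_num_frames_py frame_indices max_fi num_frames (fill_to_num_frames_py frame_indices max_fi num_frames)

-- ===== LEMMAS AND PROOFS =====

-- A positive-step full slice xs[::step] is the map of indexing over range(0, len, step).
lemma pv_strided (cands : List Int) (step : Int) (hs : 0 < step) :
    (PySem.List.slice? cands none none step).getD []
      = (PySem.List.pyRange 0 (cands.length : Int) step).map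
          (fun i => PySem.List.pyGetD cands i 0) := by
  have hne : step ≠ 0 := by omega
  have hnlt : ¬ step < 0 := by omega
  rw [PySem.List.pyRange_of_pos _ _ hs]
  simp only [PySem.List.slice?, PySem.List.sliceIndices, if_neg hne, if_neg hnlt, if_pos hs,
    Option.getD_some, List.map_map]
  have hbound : ∀ k : Nat, k < (if 0 < (cands.length:Int) then (((cands.length:Int) - 0 + step - 1) / step).toNat else 0) → step * (k:Int) < (cands.length:Int) := by
    intro k hk
    split at hk
    · have h1 : (k:Int) < ((cands.length:Int) - 0 + step - 1) / step := by
        exact_mod_cast Int.lt_toNat.mp hk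
      have h2 : ((k:Int) + 1) * step ≤ (cands.length:Int) - 0 + step - 1 :=
        (Int.le_ediv_iff_mul_le hs).mp (by omega)
      nlinarith
    · omega
  rw [← List.filterMap_eq_map]
  apply List.filterMap_congr
  intro k hk
  have hk' := hbound k (List.mem_range.mp hk)
  have h0 : (0:Int) ≤ step * (k:Int) := by positivity
  have hlt : (step * (k:Int)).toNat < cands.length := by omega
  simp only [Function.comp_apply, zero_add]
  rw [List.getElem?_eq_getElem hlt, PySem.List.pyGetD_eq_getElem cands 0 (by omega) (by omega)]

-- The gap walk over a strictly increasing list of existing indices, all inside (prev, hi),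
-- produces exactly the missing indices of [prev+1, hi): the range filtered by non-membership.
lemma pv_gapwalk (ex : List Int) (hi : Int) :
    ∀ (acc : List Int) (prev : Int),
      ex.Pairwise (· < ·) →
      (∀ x ∈ ex, prev < x ∧ x < hi) →
      ((ex ++ [hi]).foldl
        (fun (s : List Int × Int) e => (s.1 ++ PySem.List.pyRange (s.2 + 1) e 1, e))
        (acc, prev)).1
      = acc ++ (PySem.List.pyRange (prev + 1) hi 1).filter (fun i => !(ex.contains i)) := by
  induction ex with
  | nil =>
    intro acc prev _ _
    simp [List.foldl]
  | cons e rest ih =>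
    intro acc prev hp hb
    have he : prev < e := (hb e (by simp)).1
    have hehi : e < hi := (hb e (by simp)).2
    have hrest : ∀ x ∈ rest, e < x := fun x hx => List.rel_of_pairwise_cons hp hx
    simp only [List.cons_append, List.foldl_cons]
    rw [ih (acc ++ PySem.List.pyRange (prev + 1) e 1) e hp.of_cons
        (fun x hx => ⟨hrest x hx, (hb x (by simp [hx])).2⟩)]
    rw [PySem.List.pyRange_one_append (prev + 1) e hi (by omega) (by omega),
        PySem.List.pyRange_one_cons hehi, List.filter_append]
    have h1 : List.filter (fun i => !(e :: rest).contains i) (PySem.List.pyRange (prev + 1) e 1)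
        = PySem.List.pyRange (prev + 1) e 1 := by
      apply List.filter_eq_self.mpr
      intro a ha
      have ha' := PySem.List.mem_pyRange_one.mp ha
      have : a ∉ e :: rest := by
        intro hx
        rcases hx with _ | hx
        · omega
        · have := hrest a (by assumption); omega
      simpa using this
    have h2 : List.filter (fun i => !(e :: rest).contains i) (e :: PySem.List.pyRange (e + 1) hi 1)
        = List.filter (fun i => !rest.contains i) (PySem.List.pyRange (e + 1) hi 1) := by
      rw [List.filter_cons]
      have : ((!(e :: rest).contains e) = true) = False := by simp
      simp only [this, if_false]
      apply List.filter_congr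
      intro a ha
      have ha' := PySem.List.mem_pyRange_one.mp ha
      have : (a == e) = false := by simp; omega
      simp only [List.contains_cons, this, Bool.false_or]
    rw [h1, h2, List.append_assoc]

-- A's picking loop appends the first (need - added) of the values candidates[i], i running
-- over the given index list, provided those values are distinct and none is in the start set.
lemma pv_loopA (need : Int) (cands : List Int) :
    ∀ (idxs : List Int) (ex0 : PySem.Set Int) (out0 : List Int) (added : Int),
      (idxs.map (fun i => PySem.List.pyGetD cands i 0)).Nodup →
      (∀ v ∈ idxs.map (fun i => PySem.List.pyGetD cands i 0), PySem.Set.contains ex0 v = false) →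
      (idxs.foldl
        (fun (s : PySem.Set Int × List Int × Int) i =>
          if need ≤ s.2.2 then s
          else
            if !(PySem.Set.contains s.1 (PySem.List.pyGetD cands i 0)) then
              (PySem.Set.add s.1 (PySem.List.pyGetD cands i 0), s.2.1 ++ [PySem.List.pyGetD cands i 0], s.2.2 + 1)
            else s)
        (ex0, out0, added)).2.1
      = out0 ++ (idxs.map (fun i => PySem.List.pyGetD cands i 0)).take (need - added).toNat := by
  intro idxs
  induction idxs with
  | nil => intro ex0 out0 added _ _; simp
  | cons i rest ih =>
    intro ex0 out0 added hnd hfree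
    simp only [List.map_cons] at hnd hfree
    simp only [List.foldl_cons, List.map_cons]
    by_cases hna : need ≤ added
    · rw [if_pos hna]
      have h0 : (need - added).toNat = 0 := by omega
      rw [h0, List.take_zero, List.append_nil,
          ih ex0 out0 added hnd.of_cons (fun v hv => hfree v (List.mem_cons_of_mem _ hv))]
      simp [h0]
    · rw [if_neg hna]
      have hv := hfree _ List.mem_cons_self
      simp only [hv, Bool.not_false, if_true]
      have hfree' : ∀ w ∈ rest.map (fun i => PySem.List.pyGetD cands i 0),
          PySem.Set.contains (PySem.Set.add ex0 (PySem.List.pyGetD cands i 0)) w = false := by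
        intro w hw
        have hne : w ≠ PySem.List.pyGetD cands i 0 := by
          intro h; exact (List.nodup_cons.mp hnd).1 (h ▸ hw)
        have h2 : PySem.Set.contains ex0 w = false := hfree w (List.mem_cons_of_mem _ hw)
        have : w ∉ PySem.Set.add ex0 (PySem.List.pyGetD cands i 0) := by
          rw [PySem.Set.mem_add]
          push Not
          refine ⟨?_, hne⟩
          intro hmem
          rw [(PySem.Set.contains_iff ex0 w).mpr hmem] at h2
          exact absurd h2 (by simp)
        simpa [← Bool.not_eq_true, PySem.Set.contains_iff] using this
      rw [ih _ _ _ hnd.of_cons hfree']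
      have hsucc : (need - added).toNat = (need - (added + 1)).toNat + 1 := by omega
      rw [hsucc, List.take_succ_cons, List.append_assoc]
      rfl

-- ===== VERDICT (by name: the statement is the Claim_ definition above) =====
set_option maxRecDepth 8192 in
theorem fill_to_num_frames_py_spec : Claim_equal_fill_to_num_frames_py := by
  intro out max_fi num_frames _
  unfold Spec_fill_to_num_frames_py fill_to_num_frames_py fill_to_num_frames_py_alt
  simp only []
  by_cases hc : num_frames - (out.length : Int) ≤ 0 ∨ max_fi < 0
  · rw [if_pos hc, if_pos hc]
  · rw [if_neg hc, if_neg hc]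
    push Not at hc
    obtain ⟨hneed, hmax⟩ := hc
    set ex : List Int := PySem.List.sorted
        (PySem.Set.ofList (out.filter (fun x => decide (0 ≤ x) && decide (x ≤ max_fi))))
        (fun x => x) false with hex
    clear_value ex
    have hpw : ex.Pairwise (· < ·) := by
      rw [hex]; exact PySem.List.sorted_ofList_pairwise_lt _
    have hgap := pv_gapwalk ex (max_fi + 1) [] (-1) hpw
      (by
        intro x hx
        rw [hex, PySem.List.mem_sorted, PySem.Set.mem_ofList, List.mem_filter] at hx
        have := hx.2
        simp only [Bool.and_eq_true, decide_eq_true_eq] at this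
        omega)
    rw [show (-1:Int)+1 = 0 by norm_num, List.nil_append] at hgap
    have hcand : (PySem.List.pyRange 0 (max_fi + 1) 1).filter
          (fun i => !(PySem.Set.contains (PySem.Set.ofList out) i))
        = (PySem.List.pyRange 0 (max_fi + 1) 1).filter (fun i => !(ex.contains i)) := by
      apply List.filter_congr
      intro a ha
      have ha' := PySem.List.mem_pyRange_one.mp ha
      have hmm : a ∈ ex ↔ a ∈ out := by
        rw [hex, PySem.List.mem_sorted, PySem.Set.mem_ofList, List.mem_filter]
        constructor
        · exact fun h => h.1
        · intro h
          exact ⟨h, by simp only [Bool.and_eq_true, decide_eq_true_eq]; omega⟩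
      congr 1
      rw [Bool.eq_iff_iff]
      simp only [PySem.Set.contains_eq_listContains, List.contains_iff_mem,
        PySem.Set.mem_ofList, hmm]
    rw [hcand, hgap]
    set need : Int := num_frames - (out.length : Int) with hneeddef
    clear_value need
    set cands : List Int := (PySem.List.pyRange 0 (max_fi + 1) 1).filter (fun i => !(ex.contains i)) with hcands
    clear_value cands
    set step : Int := if (cands.length : Int) < need then 1
      else max 1 (PySem.Int.floordiv (cands.length : Int) (need + 1)) with hstepdef
    clear_value step
    have hstep_pos : 0 < step := by
      rw [hstepdef]
      split
      · omega
      · exact lt_max_iff.mpr (Or.inl one_pos)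
    have hnd_c : cands.Nodup := by
      rw [hcands]; exact (PySem.List.nodup_pyRange_one _ _).filter _
    have hrangend : (PySem.List.pyRange 0 (cands.length : Int) step).Nodup := by
      rw [PySem.List.pyRange_of_pos _ _ hstep_pos]
      refine List.Nodup.map ?_ (List.nodup_range)
      intro k l h
      simp only [zero_add] at h
      exact Nat.cast_injective (mul_left_cancel₀ (ne_of_gt hstep_pos) h)
    have hvalsnd : ((PySem.List.pyRange 0 (cands.length : Int) step).map
        (fun i => PySem.List.pyGetD cands i 0)).Nodup := by
      refine List.Nodup.map_on ?_ hrangend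
      intro x hx y hy hxy
      obtain ⟨hx1, hx2, -⟩ := (PySem.List.mem_pyRange_iff_of_pos hstep_pos _).mp hx
      obtain ⟨hy1, hy2, -⟩ := (PySem.List.mem_pyRange_iff_of_pos hstep_pos _).mp hy
      rw [PySem.List.pyGetD_eq_getElem cands 0 hx1 (by exact_mod_cast hx2),
          PySem.List.pyGetD_eq_getElem cands 0 hy1 (by exact_mod_cast hy2)] at hxy
      have := (List.Nodup.getElem_inj_iff hnd_c).mp hxy
      omega
    have hfree : ∀ v ∈ (PySem.List.pyRange 0 (cands.length : Int) step).map
        (fun i => PySem.List.pyGetD cands i 0),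
        PySem.Set.contains (PySem.Set.ofList out) v = false := by
      intro v hv
      obtain ⟨i, hi, rfl⟩ := List.mem_map.mp hv
      obtain ⟨h1, h2, -⟩ := (PySem.List.mem_pyRange_iff_of_pos hstep_pos _).mp hi
      rw [PySem.List.pyGetD_eq_getElem cands 0 h1 (by exact_mod_cast h2)]
      have hmem : cands[i.toNat] ∈ cands := List.getElem_mem _
      have hfil : cands[i.toNat] ∈ (PySem.List.pyRange 0 (max_fi + 1) 1).filter
          (fun i => !(ex.contains i)) := by rw [← hcands]; exact hmem
      rw [List.mem_filter] at hfil
      obtain ⟨hrng, hnotex⟩ := hfil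
      have hb := PySem.List.mem_pyRange_one.mp hrng
      have hnotex' : cands[i.toNat] ∉ ex := by simpa using hnotex
      have hnotout : cands[i.toNat] ∉ out := by
        intro h
        apply hnotex'
        rw [hex, PySem.List.mem_sorted, PySem.Set.mem_ofList, List.mem_filter]
        exact ⟨h, by simp only [Bool.and_eq_true, decide_eq_true_eq]; omega⟩
      simp only [PySem.Set.contains_eq_listContains]
      rw [← Bool.not_eq_true, List.contains_iff_mem, PySem.Set.mem_ofList]
      exact hnotout
    rw [pv_loopA need cands (PySem.List.pyRange 0 (cands.length : Int) step)
        (PySem.Set.ofList out) out 0 hvalsnd hfree,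
      pv_strided cands step hstep_pos,
      PySem.List.slice_to _ (le_of_lt hneed),
      sub_zero]
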